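-- pv_equiv track=rewrite | github.com/Nghia03092004/nghia03092004.github.io | project_euler/problem_851/solution.py | find_essential_pis
-- ===== SOURCE A (Python) =====
-- def covers(pi, minterm, n):
--     """Check if prime implicant (value, dash) covers a minterm."""
--     val, dash = pi
--     return (minterm & ~dash) == (val & ~dash)
--
-- def find_essential_pis(pis, minterms, n):
--     """Find essential prime implicants."""
--     pi_list = list(pis)
--     essential = set()
--     remaining = set(minterms)
--
--     for m in minterms:
--         covering = [pi for pi in pi_list if covers(pi, m, n)]
--         if len(covering) == 1:
--             essential.add(covering[0])
--
--     for pi in essential: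
--         remaining -= {m for m in remaining if covers(pi, m, n)}
--
--     return essential, remaining
-- ===== SOURCE B (Python) =====
-- def covers(pi, minterm, n):
--     """Check if prime implicant (value, dash) covers a minterm."""
--     val, dash = pi
--     return (minterm & ~dash) == (val & ~dash)
--
-- def find_essential_pis(pis, minterms, n):
--     """Find essential prime implicants."""
--     pi_list = list(pis)
--     # Build the coverage table once: minterm -> list of covering PIs.
--     cover_map = {}
--     for m in minterms:
--         cover_map[m] = [pi for pi in pi_list if covers(pi, m, n)]
--     essential = set()
--     for m in minterms:
--         cov = cover_map[m]
--         if len(cov) == 1: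
--             essential.add(cov[0])
--     remaining = {m for m in dict.fromkeys(minterms)
--                  if not any(pi in essential for pi in cover_map[m])}
--     return essential, remaining
-- ===== Notes on version B (the rewrite author's own statement) =====
-- stated objective: alternative
-- what changed: B builds the minterm->covering-PIs table once as a dict and derives both the essential set (singleton rows) and the uncovered set (rows with no essential member) from that table, replacing A's per-minterm rescans and its iterative set-subtraction loop over essential PIs.
import Mathlib
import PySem

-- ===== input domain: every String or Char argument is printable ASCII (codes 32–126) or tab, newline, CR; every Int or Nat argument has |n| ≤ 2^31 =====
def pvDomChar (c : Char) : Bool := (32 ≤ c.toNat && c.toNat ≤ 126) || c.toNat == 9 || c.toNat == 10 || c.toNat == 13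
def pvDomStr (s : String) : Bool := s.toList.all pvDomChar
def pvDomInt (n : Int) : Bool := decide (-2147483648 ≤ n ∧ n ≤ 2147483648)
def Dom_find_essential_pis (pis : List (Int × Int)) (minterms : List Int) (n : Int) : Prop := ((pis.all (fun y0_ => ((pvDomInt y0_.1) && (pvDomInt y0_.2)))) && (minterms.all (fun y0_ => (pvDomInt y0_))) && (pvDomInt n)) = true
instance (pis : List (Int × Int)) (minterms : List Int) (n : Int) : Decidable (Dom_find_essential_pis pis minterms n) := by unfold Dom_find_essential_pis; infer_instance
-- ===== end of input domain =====

-- B builds the coverage table (dict) once and derives essential and remaining from it; same value as A. Python A returns (set, set); the lists below hold their distinct elements.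

-- ===== PORT A =====
def covers (pi : Int × Int) (minterm : Int) (_n : Int) : Bool :=
  PySem.Int.band minterm (Int.not pi.2) == PySem.Int.band pi.1 (Int.not pi.2)

def find_essential_pis (pis : List (Int × Int)) (minterms : List Int) (n : Int) : (List (Int × Int)) × List Int :=
  let pi_list := pis
  let essential := minterms.foldl (fun es m =>
      let covering := pi_list.filter (fun pi => covers pi m n)
      if covering.length == 1 then PySem.Set.add es covering.headI else es)
    PySem.Set.empty
  let remaining := essential.foldl (fun rem pi =>
      PySem.Set.diff rem (PySem.Set.ofList (rem.filter (fun m => covers pi m n))))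
    (PySem.Set.ofList minterms)
  (essential, remaining)

-- ===== PORT B =====
def find_essential_pis_alt (pis : List (Int × Int)) (minterms : List Int) (n : Int) : (List (Int × Int)) × List Int :=
  let pi_list := pis
  let cover_map := minterms.foldl
      (fun d m => d.insert m (pi_list.filter (fun pi => covers pi m n)))
      PySem.Dict.empty
  let essential := minterms.foldl (fun es m =>
      let cov := cover_map.getD m []
      if cov.length == 1 then PySem.Set.add es cov.headI else es)
    PySem.Set.empty
  let remaining := (PySem.List.dedup minterms).filter
      (fun m => !((cover_map.getD m []).any (fun pi => PySem.Set.contains essential pi)))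
  (essential, remaining)

-- ===== PRECONDITION & SPEC =====
def Spec_find_essential_pis (pis : List (Int × Int)) (minterms : List Int) (n : Int) (out : (List (Int × Int)) × List Int) : Prop := out = find_essential_pis_alt pis minterms n
instance (pis : List (Int × Int)) (minterms : List Int) (n : Int) (out : (List (Int × Int)) × List Int) : Decidable (Spec_find_essential_pis pis minterms n out) := by unfold Spec_find_essential_pis; infer_instance

-- ===== CLAIM (what is proved, stated in full; the proofs are below) =====
def Claim_equal_find_essential_pis : Prop := ∀ (pis : List (Int × Int)) (minterms : List Int) (n : Int), Dom_find_essential_pis pis minterms n → Spec_find_essential_pis pis minterms n (find_essential_pis pis minterms n)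

-- ===== LEMMAS AND PROOFS =====

-- table lookup at a key absent from the rest of the loop
theorem getD_foldl_absent (f : Int → List (Int × Int))
    (l : List Int) (d : PySem.Dict Int (List (Int × Int))) (m : Int) (h : m ∉ l) :
    (l.foldl (fun d x => d.insert x (f x)) d).getD m [] = d.getD m [] := by
  induction l generalizing d with
  | nil => rfl
  | cons x t ih =>
      simp only [List.mem_cons, not_or] at h
      rw [List.foldl_cons, ih _ h.2, PySem.Dict.getD_insert]
      simp [h.1]

-- table lookup at a key of the loop gives the row for that key
theorem getD_foldl_mem (f : Int → List (Int × Int))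
    (l : List Int) (d : PySem.Dict Int (List (Int × Int))) (m : Int) :
    m ∈ l → (l.foldl (fun d x => d.insert x (f x)) d).getD m [] = f m := by
  induction l generalizing d with
  | nil => intro h; cases h
  | cons x t ih =>
      intro h
      rw [List.foldl_cons]
      by_cases hm : m ∈ t
      · exact ih _ hm
      · have hx : m = x := by
          cases h with
          | head => rfl
          | tail _ h2 => exact absurd h2 hm
        rw [getD_foldl_absent _ _ _ _ hm, hx, PySem.Dict.getD_insert]
        simp

-- every element collected into essential comes from pis
theorem essential_subset (pis : List (Int × Int)) (n : Int)
    (l : List Int) (es : PySem.Set (Int × Int)) (hes : ∀ x ∈ es, x ∈ pis) :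
    ∀ x ∈ l.foldl (fun es m =>
        let covering := pis.filter (fun pi => covers pi m n)
        if covering.length == 1 then PySem.Set.add es covering.headI else es) es,
      x ∈ pis := by
  induction l generalizing es with
  | nil => exact hes
  | cons m t ih =>
      rw [List.foldl_cons]
      apply ih
      intro x hx
      by_cases hlen : (pis.filter (fun pi => covers pi m n)).length == 1
      · simp only [hlen, if_pos] at hx
        rcases (PySem.Set.mem_add _ _ _).1 hx with h | h
        · exact hes x h
        · subst h
          rcases List.length_eq_one_iff.1 (by simpa using hlen) with ⟨c, hc⟩
          have : c ∈ pis.filter (fun pi => covers pi m n) := by simp [hc]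
          simpa [hc] using List.mem_of_mem_filter this
      · simpa [hlen] using hes x (by simpa [hlen] using hx)

-- set subtraction of the covered part is a filter
theorem diff_covered (rem : List Int) (p : Int → Bool) :
    PySem.Set.diff rem (PySem.Set.ofList (rem.filter p)) = rem.filter (fun m => !p m) := by
  apply List.filter_congr
  intro m hm
  have : m ∈ PySem.Set.ofList (rem.filter p) ↔ p m = true := by
    rw [PySem.Set.mem_ofList, List.mem_filter]
    exact ⟨fun h => h.2, fun h => ⟨hm, h⟩⟩
  by_cases hp : p m = true
  · simp [hp, hm]
  · have : m ∉ PySem.Set.ofList (rem.filter p) := fun hmem => hp (this.1 hmem)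
    have hc : PySem.Set.contains (PySem.Set.ofList (rem.filter p)) m = false := by
      cases hcc : PySem.Set.contains (PySem.Set.ofList (rem.filter p)) m
      · rfl
      · exact absurd ((PySem.Set.contains_iff _ _).1 hcc) this
    simp [hp, hm]

-- repeated filtering by each pi equals one filter by "no pi covers"
theorem foldl_filter_any (c : Int × Int → Int → Bool) (es : List (Int × Int)) :
    ∀ l0 : List Int,
      es.foldl (fun rem pi => rem.filter (fun m => !c pi m)) l0
        = l0.filter (fun m => !es.any (fun pi => c pi m)) := by
  induction es with
  | nil => intro l0; simp
  | cons h t ih =>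
      intro l0
      rw [List.foldl_cons, ih]
      rw [List.filter_filter]
      apply List.filter_congr
      intro m _
      simp [Bool.and_comm]

theorem find_essential_pis_spec : Claim_equal_find_essential_pis := by
  intro pis minterms n _
  unfold Spec_find_essential_pis find_essential_pis find_essential_pis_alt
  simp only
  set cm := minterms.foldl
      (fun d m => d.insert m (pis.filter (fun pi => covers pi m n)))
      PySem.Dict.empty with hcm
  have hrow : ∀ m ∈ minterms, cm.getD m [] = pis.filter (fun pi => covers pi m n) := by
    intro m hm
    exact getD_foldl_mem (fun m => pis.filter (fun pi => covers pi m n)) minterms _ m hm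
  have hess : minterms.foldl (fun es m =>
        let covering := pis.filter (fun pi => covers pi m n)
        if covering.length == 1 then PySem.Set.add es covering.headI else es)
        PySem.Set.empty
      = minterms.foldl (fun es m =>
        let cov := cm.getD m []
        if cov.length == 1 then PySem.Set.add es cov.headI else es)
        PySem.Set.empty := by
    apply PySem.List.foldl_congr_mem
    intro es m hm
    simp only [hrow m hm]
  rw [← hess]
  set ess := minterms.foldl (fun es m =>
        let covering := pis.filter (fun pi => covers pi m n)
        if covering.length == 1 then PySem.Set.add es covering.headI else es)
        PySem.Set.empty with hessd
  have hsub : ∀ x ∈ ess, x ∈ pis :=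
    essential_subset pis n minterms PySem.Set.empty (by intro x hx; cases hx)
  -- the remaining sets agree
  have hrem : ess.foldl (fun rem pi =>
        PySem.Set.diff rem (PySem.Set.ofList (rem.filter (fun m => covers pi m n))))
        (PySem.Set.ofList minterms)
      = (PySem.List.dedup minterms).filter
        (fun m => !((cm.getD m []).any (fun pi => PySem.Set.contains ess pi))) := by
    have h1 : ess.foldl (fun rem pi =>
          PySem.Set.diff rem (PySem.Set.ofList (rem.filter (fun m => covers pi m n))))
          (PySem.Set.ofList minterms)
        = ess.foldl (fun rem pi => rem.filter (fun m => !covers pi m n))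
          (PySem.Set.ofList minterms) := by
      apply PySem.List.foldl_congr_mem
      intro rem pi _
      exact diff_covered rem (fun m => covers pi m n)
    rw [h1, foldl_filter_any (fun pi m => covers pi m n) ess (PySem.Set.ofList minterms)]
    have hdd : PySem.Set.ofList minterms = PySem.List.dedup minterms := by
      simp [PySem.List.dedup_eq_ofList]
    rw [hdd]
    apply List.filter_congr
    intro m hm
    have hmm : m ∈ minterms := by
      rw [← hdd] at hm; exact (PySem.Set.mem_ofList _ _).1 hm
    rw [hrow m hmm]
    congr 1
    rw [Bool.eq_iff_iff]
    simp only [List.any_eq_true, List.mem_filter]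
    constructor
    · rintro ⟨pi, hpe, hc⟩
      exact ⟨pi, ⟨hsub pi hpe, hc⟩, (PySem.Set.contains_iff _ _).2 hpe⟩
    · rintro ⟨pi, ⟨_, hc⟩, hco⟩
      exact ⟨pi, (PySem.Set.contains_iff _ _).1 hco, hc⟩
  rw [hrem]

-- ===== VERDICT (by name: the statement is the Claim_ definition above) =====
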